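-- pv_equiv track=rewrite | github.com/ankul-in/Two-years | KATA117.py | who_is_serving
-- ===== SOURCE A (Python) =====
-- def who_is_serving(current_round: int) -> int:
--     x=1
--     counter=1
--     while x<current_round+1:
--         x+=2
--         counter+=1
--     if counter % 2 == 0:
--         return 1
--     else:
--         return 2
-- ===== SOURCE B (Python) =====
-- def who_is_serving(current_round: int) -> int:
--     # closed form: serves changes every two rounds; k = ceil(current_round/2)
--     k = -(-current_round // 2) if current_round > 0 else 0
--     return 1 if k % 2 == 1 else 2
-- ===== Notes on version B (the rewrite author's own statement) =====
-- stated objective: faster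
-- what changed: Replaced the O(n) while-loop that counts in steps of two by a closed-form parity test of the ceiling half of current_round.
import Mathlib
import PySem

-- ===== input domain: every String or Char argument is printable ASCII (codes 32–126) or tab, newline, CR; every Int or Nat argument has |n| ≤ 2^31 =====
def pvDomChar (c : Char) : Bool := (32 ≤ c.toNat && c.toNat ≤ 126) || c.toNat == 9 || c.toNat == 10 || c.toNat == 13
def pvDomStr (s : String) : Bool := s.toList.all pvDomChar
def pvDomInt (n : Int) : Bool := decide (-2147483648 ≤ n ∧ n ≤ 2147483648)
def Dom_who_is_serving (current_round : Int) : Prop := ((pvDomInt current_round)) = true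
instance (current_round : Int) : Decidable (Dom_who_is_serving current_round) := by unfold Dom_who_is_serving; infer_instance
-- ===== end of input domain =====

-- B replaces A's O(n) step-by-two counting loop with the closed form ceil(current_round/2) and a parity test.

-- ===== PORT A =====
-- literal port of A's while loop: state (x, counter), step x+=2, counter+=1 while x < current_round+1
def whoLoop (current_round x counter : Int) : Int :=
  if x < current_round + 1 then whoLoop current_round (x + 2) (counter + 1) else counter
termination_by (current_round + 1 - x).toNat
decreasing_by omega

def who_is_serving (current_round : Int) : Int :=
  let counter := whoLoop current_round 1 1
  if PySem.Int.mod counter 2 = 0 then 1 else 2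

-- ===== PORT B =====
def who_is_serving_alt (current_round : Int) : Int :=
  let k : Int := if current_round > 0 then -(PySem.Int.floordiv (-current_round) 2) else 0
  if PySem.Int.mod k 2 = 1 then 1 else 2

-- ===== PRECONDITION & SPEC =====
def Spec_who_is_serving (current_round : Int) (out : Int) : Prop := out = who_is_serving_alt current_round
instance (current_round : Int) (out : Int) : Decidable (Spec_who_is_serving current_round out) := by unfold Spec_who_is_serving; infer_instance

-- ===== CLAIM (what is proved, stated in full; the proofs are below) =====
def Claim_equal_who_is_serving : Prop := ∀ (current_round : Int), Dom_who_is_serving current_round → Spec_who_is_serving current_round (who_is_serving current_round)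

-- ===== LEMMAS AND PROOFS =====

-- A's loop runs exactly ((current_round + 1 - x).toNat + 1) / 2 iterations
theorem whoLoop_eq (current_round : Int) : ∀ (n : Nat) (x counter : Int),
    (current_round + 1 - x).toNat = n →
    whoLoop current_round x counter = counter + (((current_round + 1 - x).toNat + 1) / 2 : Nat) := by
  intro n
  induction n using Nat.strong_induction_on with
  | _ n ih =>
    intro x counter hn
    rw [whoLoop]
    split
    · rename_i hlt
      rw [ih (current_round + 1 - (x + 2)).toNat (by omega) (x + 2) (counter + 1) rfl]
      omega
    · omega

-- ===== VERDICT (by name: the statement is the Claim_ definition above) =====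
theorem who_is_serving_spec : Claim_equal_who_is_serving := by
  intro cr _
  unfold Spec_who_is_serving who_is_serving who_is_serving_alt
  dsimp only
  rw [whoLoop_eq cr (cr + 1 - 1).toNat 1 1 rfl]
  set c : Int := 1 + (((cr + 1 - 1).toNat + 1) / 2 : Nat) with hc
  rw [PySem.Int.mod_eq_emod_of_pos (a := c) (by omega)]
  by_cases hpos : cr > 0
  · simp only [if_pos hpos]
    set q : Int := -(PySem.Int.floordiv (-cr) 2) with hq
    have hb := PySem.Int.neg_floordiv_neg_eq_iff_of_pos (a := cr) (b := 2) (q := q)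
      (by omega) |>.mp hq.symm
    rw [PySem.Int.mod_eq_emod_of_pos (a := q) (by omega)]
    split <;> split <;> omega
  · simp only [if_neg hpos]
    have : c = 1 := by omega
    rw [this]
    decide
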